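-- pv_equiv track=rewrite | github.com/walnuthq/walnut-cli | src/soldb/abi_utils.py | match_single_type
-- ===== SOURCE A (Python) =====
-- def match_single_type(parsed_type: str, abi_type: str) -> bool:
--     """Match a single parsed type with ABI type."""
--     # Handle basic types
--     if parsed_type == abi_type:
--         return True
--     # Handle tuple types
--     if parsed_type.startswith('(') and parsed_type.endswith(')') and abi_type == 'tuple':
--         return True
--     # Handle array types
--     if parsed_type.endswith('[]') and abi_type.endswith('[]'):
--         # Remove array brackets and compare base types
--         parsed_base = parsed_type[:-2]
--         abi_base = abi_type[:-2]
--         return match_single_type(parsed_base, abi_base)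
--     # Handle nested tuples - basic matching
--     if '(' in parsed_type and abi_type == 'tuple':
--         return True
--     return False
-- ===== SOURCE B (Python) =====
-- def match_single_type(parsed_type: str, abi_type: str) -> bool:
--     """Match a single parsed type with ABI type (depth-stripping formulation)."""
--     def arr_depth(s: str) -> int:
--         d = 0
--         while s.endswith('[]'):
--             s = s[:-2]
--             d += 1
--         return d
--
--     k = min(arr_depth(parsed_type), arr_depth(abi_type))
--     p = parsed_type[:len(parsed_type) - 2 * k]
--     a = abi_type[:len(abi_type) - 2 * k]
--     return p == a or ('(' in p and a == 'tuple')
-- ===== Notes on version B (the rewrite author's own statement) =====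
-- stated objective: simpler
-- what changed: Replaces A's per-level recursion (which re-runs all four checks at every array depth) by computing each string's trailing-'[]' depth once, stripping the common depth in a single slice, and doing one final non-recursive check; the parenthesised-tuple test is dropped as subsumed by the "'(' in p" test.
import Mathlib
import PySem

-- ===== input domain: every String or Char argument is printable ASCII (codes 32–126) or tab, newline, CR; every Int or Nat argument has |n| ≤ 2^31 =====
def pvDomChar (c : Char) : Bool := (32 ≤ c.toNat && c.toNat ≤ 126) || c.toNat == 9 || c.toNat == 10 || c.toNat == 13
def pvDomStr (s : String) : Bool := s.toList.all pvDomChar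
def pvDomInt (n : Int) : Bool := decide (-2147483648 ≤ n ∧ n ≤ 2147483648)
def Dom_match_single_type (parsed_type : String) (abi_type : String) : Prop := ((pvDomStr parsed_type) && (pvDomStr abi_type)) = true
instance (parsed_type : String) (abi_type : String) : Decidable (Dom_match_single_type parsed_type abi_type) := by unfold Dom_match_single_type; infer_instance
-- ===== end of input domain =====

-- B replaces A's per-level recursion by computing the common trailing-"[]" depth once, stripping it in one
-- slice, and doing a single non-recursive check (objective: simpler; no speed claim).

-- ===== PORT A =====
-- recursion on the list of characters; each Python string op is the PySem.Chars primitive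
def matchSingleA (p a : List Char) : Bool :=
  if p == a then true
  else if PySem.Chars.startswith p ['('] && PySem.Chars.endswith p [')'] && a == "tuple".toList then true
  else if h : PySem.Chars.endswith p ['[', ']'] && PySem.Chars.endswith a ['[', ']'] then
    matchSingleA (PySem.List.slice p none (some (-2))) (PySem.List.slice a none (some (-2)))
  else if PySem.Chars.isIn ['('] p && a == "tuple".toList then true
  else false
termination_by p.length
decreasing_by
  have h2 : ['[', ']'] <:+ p := (PySem.Chars.endswith_iff _ _).mp (by
    have := h; simp only [Bool.and_eq_true] at this; exact this.1)
  have hlen : 2 ≤ p.length := h2.length_le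
  rw [PySem.List.slice_to_neg_ofNat p 2 (by omega)]
  simp [List.length_take]; omega

def match_single_type (parsed_type : String) (abi_type : String) : Bool :=
  matchSingleA parsed_type.toList abi_type.toList

-- ===== PORT B =====
-- arr_depth's while loop: s[:-2] on a string ending with "[]" is s.take (s.length - 2) (exact here)
def arrDepth (s : List Char) : Nat :=
  if h : PySem.Chars.endswith s ['[', ']'] then
    arrDepth (s.take (s.length - 2)) + 1
  else 0
termination_by s.length
decreasing_by
  have h2 : ['[', ']'] <:+ s := (PySem.Chars.endswith_iff _ _).mp h
  have hlen : 2 ≤ s.length := h2.length_le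
  simp [List.length_take]; omega

-- p[:len(p) - 2*k] with 2*k ≤ len p is p.take (p.length - 2*k) (exact: the bound is nonnegative)
def matchSingleB (p a : List Char) : Bool :=
  let k := min (arrDepth p) (arrDepth a)
  let p' := p.take (p.length - 2 * k)
  let a' := a.take (a.length - 2 * k)
  p' == a' || (PySem.Chars.isIn ['('] p' && a' == "tuple".toList)

def match_single_type_alt (parsed_type : String) (abi_type : String) : Bool :=
  matchSingleB parsed_type.toList abi_type.toList

-- ===== PRECONDITION & SPEC =====
def Spec_match_single_type (parsed_type : String) (abi_type : String) (out : Bool) : Prop := out = match_single_type_alt parsed_type abi_type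
instance (parsed_type : String) (abi_type : String) (out : Bool) : Decidable (Spec_match_single_type parsed_type abi_type out) := by unfold Spec_match_single_type; infer_instance

-- ===== CLAIM (what is proved, stated in full; the proofs are below) =====
def Claim_equal_match_single_type : Prop := ∀ (parsed_type : String) (abi_type : String), Dom_match_single_type parsed_type abi_type → Spec_match_single_type parsed_type abi_type (match_single_type parsed_type abi_type)

-- ===== LEMMAS AND PROOFS =====

lemma endswith_br_iff (s : List Char) :
    PySem.Chars.endswith s ['[', ']'] = true ↔ ∃ t, s = t ++ ['[', ']'] := by
  rw [PySem.Chars.endswith_iff]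
  constructor
  · rintro ⟨t, rfl⟩; exact ⟨t, rfl⟩
  · rintro ⟨t, rfl⟩; exact ⟨t, rfl⟩

lemma arrDepth_concat (t : List Char) : arrDepth (t ++ ['[', ']']) = arrDepth t + 1 := by
  rw [arrDepth]
  have he : PySem.Chars.endswith (t ++ ['[', ']']) ['[', ']'] = true :=
    (PySem.Chars.endswith_iff _ _).mpr ⟨t, rfl⟩
  rw [dif_pos he]
  have : (t ++ ['[', ']']).length - 2 = t.length := by simp
  rw [this, List.take_left]

lemma arrDepth_not (s : List Char) (h : PySem.Chars.endswith s ['[', ']'] = false) :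
    arrDepth s = 0 := by
  rw [arrDepth, dif_neg (by simp [h])]

lemma concat_ne_tuple (t : List Char) : (t ++ ['[', ']'] == "tuple".toList) = false := by
  apply beq_eq_false_iff_ne.mpr
  intro h
  have := congrArg List.getLast? h
  simp at this

lemma slice2_concat (t : List Char) :
    PySem.List.slice (t ++ ['[', ']']) none (some (-2)) = t := by
  rw [PySem.List.slice_to_neg_ofNat _ 2 (by omega)]
  have : (t ++ ['[', ']']).length - 2 = t.length := by simp
  rw [this, List.take_left]

lemma matchB_concat (p a : List Char) :
    matchSingleB (p ++ ['[', ']']) (a ++ ['[', ']']) = matchSingleB p a := by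
  simp only [matchSingleB, arrDepth_concat]
  have hk : min (arrDepth p + 1) (arrDepth a + 1) = min (arrDepth p) (arrDepth a) + 1 := by omega
  rw [hk]
  have hp : (p ++ ['[', ']']).length - 2 * (min (arrDepth p) (arrDepth a) + 1)
      = p.length - 2 * min (arrDepth p) (arrDepth a) := by
    rw [List.length_append]; simp; omega
  have ha : (a ++ ['[', ']']).length - 2 * (min (arrDepth p) (arrDepth a) + 1)
      = a.length - 2 * min (arrDepth p) (arrDepth a) := by
    rw [List.length_append]; simp; omega
  rw [hp, ha,
    List.take_append_of_le_length (by omega),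
    List.take_append_of_le_length (by omega)]

-- when the array branch cannot fire, A is the flat three-way check
lemma matchA_flat (p a : List Char)
    (h : (PySem.Chars.endswith p ['[', ']'] && PySem.Chars.endswith a ['[', ']']) = false) :
    matchSingleA p a
      = ((p == a) || (PySem.Chars.isIn ['('] p && (a == "tuple".toList))) := by
  rw [matchSingleA]
  by_cases h1 : (p == a) = true
  · simp [h1]
  · rw [if_neg h1]
    by_cases h2 : (PySem.Chars.startswith p ['('] && PySem.Chars.endswith p [')'] && (a == "tuple".toList)) = true
    · simp only [Bool.and_eq_true] at h2
      have h3 : a = "tuple".toList := by simpa using h2.2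
      have hin : PySem.Chars.isIn ['('] p = true :=
        (PySem.Chars.isIn_iff_infix _ _).mpr ((PySem.Chars.startswith_iff _ _).mp h2.1.1).isInfix
      simp [h3, hin]
      exact Or.inl ⟨h2.1.1, h2.1.2⟩
    · rw [if_neg h2, dif_neg (by simp_all)]
      cases hc : (PySem.Chars.isIn ['('] p && (a == "tuple".toList)) <;> simp [h1]

theorem matchAB : ∀ (p a : List Char), matchSingleA p a = matchSingleB p a
  | p, a => by
    by_cases hp : PySem.Chars.endswith p ['[', ']'] = true
    · by_cases ha : PySem.Chars.endswith a ['[', ']'] = true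
      · -- both end with "[]": both sides strip one level
        obtain ⟨p₀, rfl⟩ := (endswith_br_iff p).mp hp
        obtain ⟨a₀, rfl⟩ := (endswith_br_iff a).mp ha
        have ih := matchAB p₀ a₀
        rw [matchB_concat]
        rw [matchSingleA]
        by_cases heq : (p₀ ++ ['[', ']'] == a₀ ++ ['[', ']']) = true
        · rw [if_pos heq, ← ih, matchSingleA]
          have : (p₀ == a₀) = true := by
            simp only [beq_iff_eq] at heq ⊢
            exact List.append_cancel_right heq
          rw [if_pos this]
        · have h2 : (PySem.Chars.startswith (p₀ ++ ['[', ']']) ['('] &&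
              PySem.Chars.endswith (p₀ ++ ['[', ']']) [')'] &&
              ((a₀ ++ ['[', ']']) == "tuple".toList)) = false := by
            rw [concat_ne_tuple]; simp
          rw [if_neg heq, if_neg (by simp only [h2]; simp), dif_pos (by simp [hp, ha]),
            slice2_concat, slice2_concat, ih]
      · have ha' : PySem.Chars.endswith a ['[', ']'] = false := by simpa using ha
        rw [matchA_flat p a (by simp [ha'])]
        simp [matchSingleB, arrDepth_not a ha']
    · have hp' : PySem.Chars.endswith p ['[', ']'] = false := by simpa using hp
      rw [matchA_flat p a (by simp [hp'])]
      simp [matchSingleB, arrDepth_not p hp']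
  termination_by p _ => p.length
  decreasing_by subst_vars; simp

-- ===== VERDICT (by name: the statement is the Claim_ definition above) =====
theorem match_single_type_spec : Claim_equal_match_single_type := by
  intro p a _
  unfold Spec_match_single_type match_single_type match_single_type_alt
  exact matchAB p.toList a.toList
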